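-- pv_equiv track=rewrite | github.com/mezhaka/algo_competitions | google_code_jam/2019/round1/B/1.py | f
-- ===== SOURCE A (Python) =====
-- def f(people, q):
--     horiz = [0] * q
--     vert = [0] * q
--
--     for (x, y, d) in people:
--         if d == 'S':
--             for i in range(0, y):
--                 vert[i] += 1
--         elif d == 'N':
--             for i in range(y + 1, q):
--                 vert[i] += 1
--         elif d == 'W':
--             for i in range(0, x):
--                 horiz[i] += 1
--         else: #  d == 'E'
--             for i in range(x+1, q):
--                 horiz[i] += 1
--
--
--     return horiz.index(max(horiz)), vert.index(max(vert))
-- ===== SOURCE B (Python) =====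
-- def _prefix(diff, q):
--     out = []
--     cur = 0
--     for i in range(q):
--         cur += diff[i]
--         out.append(cur)
--     return out
--
--
-- def f(people, q):
--     # difference arrays: one clamped +1/-1 update per person instead of a range sweep
--     dh = [0] * (q + 1)
--     dv = [0] * (q + 1)
--     for (x, y, d) in people:
--         if d == 'S':
--             lo, hi, arr = 0, y, dv
--         elif d == 'N':
--             lo, hi, arr = y + 1, q, dv
--         elif d == 'W':
--             lo, hi, arr = 0, x, dh
--         else:  # d == 'E'
--             lo, hi, arr = x + 1, q, dh
--         lo = max(lo, 0)
--         hi = min(hi, q)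
--         if lo < hi:
--             arr[lo] += 1
--             arr[hi] -= 1
--     h = _prefix(dh, q)
--     v = _prefix(dv, q)
--     return h.index(max(h)), v.index(max(v))
-- ===== Notes on version B (the rewrite author's own statement) =====
-- stated objective: faster
-- what changed: B replaces A's per-person O(q) range sweeps with one clamped +1/-1 difference-array update per person followed by a single prefix-sum pass, then the same first-max argmax.
-- outside the precondition, e.g. on f([(0, -2, 'N')], 2): A returns (0, 1), B returns (0, 0)
-- crash fix: A raises IndexError when some person's sweep runs past an end of the array (d='S' or 'W' with coordinate > q, or d='N' or other with coordinate < -q-1); B's clamped updates return the answer for the in-grid part of the range there. — e.g. on f([(0, 5, "S")], 2): A raises IndexError, B returns (0, 0)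
import Mathlib
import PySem

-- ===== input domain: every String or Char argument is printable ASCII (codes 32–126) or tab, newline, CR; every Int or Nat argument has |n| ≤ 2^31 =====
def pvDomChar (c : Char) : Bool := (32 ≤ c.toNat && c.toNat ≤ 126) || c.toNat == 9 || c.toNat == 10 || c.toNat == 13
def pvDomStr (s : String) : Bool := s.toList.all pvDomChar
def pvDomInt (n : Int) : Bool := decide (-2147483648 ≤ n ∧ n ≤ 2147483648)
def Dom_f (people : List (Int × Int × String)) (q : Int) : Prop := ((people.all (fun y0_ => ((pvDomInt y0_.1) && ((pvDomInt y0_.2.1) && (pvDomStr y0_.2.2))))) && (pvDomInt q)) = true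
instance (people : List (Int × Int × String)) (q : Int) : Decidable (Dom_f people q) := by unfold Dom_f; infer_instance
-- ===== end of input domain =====

-- B replaces A's per-person O(q) range sweeps by one clamped ±1 difference-array update per
-- person plus a single prefix-sum pass (objective: faster, asymptotically).

-- shared helper: Python's "xs[i] += δ" (Python index semantics via PySem.List.pyIdx?;
-- where Python raises IndexError the state is returned unchanged — A's port is never
-- compared there because Python A raises, and B's updates stay in range for q ≥ 1)
def pyAddAt (xs : Array Int) (i δ : Int) : Array Int :=
  match PySem.List.pyIdx? xs.size i with
  | some k => xs.modify k (· + δ)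
  | none => xs

-- shared helper: Python's "xs[i]" read (default only where Python raises)
def pyGetA (xs : Array Int) (i : Int) (d : Int) : Int :=
  match PySem.List.pyIdx? xs.size i with
  | some k => xs.getD k d
  | none => d

-- shared helper: Python's "xs.index(max(xs))" (the 0 fallbacks are the empty-list raise, excluded by Pre_f)
def pyArgmax (xs : List Int) : Int :=
  match PySem.List.max? xs (fun v => v) with
  | some m =>
    match PySem.List.index? xs m with
    | some k => (k : Int)
    | none => 0
  | none => 0

-- ===== PORT A =====
-- body of A's "for (x, y, d) in people" loop: per person, a sweep incrementing every cell of a range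
def stepA (q : Int) (s : Array Int × Array Int) (p : Int × Int × String) : Array Int × Array Int :=
  if p.2.2 == "S" then (s.1, (PySem.List.pyRange 0 p.2.1).foldl (fun acc i => pyAddAt acc i 1) s.2)
  else if p.2.2 == "N" then (s.1, (PySem.List.pyRange (p.2.1 + 1) q).foldl (fun acc i => pyAddAt acc i 1) s.2)
  else if p.2.2 == "W" then ((PySem.List.pyRange 0 p.1).foldl (fun acc i => pyAddAt acc i 1) s.1, s.2)
  else ((PySem.List.pyRange (p.1 + 1) q).foldl (fun acc i => pyAddAt acc i 1) s.1, s.2)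

def f (people : List (Int × Int × String)) (q : Int) : Int × Int :=
  let r := people.foldl (stepA q) (Array.replicate q.toNat 0, Array.replicate q.toNat 0)
  (pyArgmax r.1.toList, pyArgmax r.2.toList)

-- ===== PORT B =====
-- body of B's loop: pick the range and the array, clamp it to the grid, apply one ±1 diff update
def stepB (q : Int) (s : Array Int × Array Int) (p : Int × Int × String) : Array Int × Array Int :=
  let lht : Int × Int × Bool :=
    if p.2.2 == "S" then (0, p.2.1, true)
    else if p.2.2 == "N" then (p.2.1 + 1, q, true)
    else if p.2.2 == "W" then (0, p.1, false)
    else (p.1 + 1, q, false)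
  let lo := max lht.1 0
  let hi := min lht.2.1 q
  if lo < hi then
    if lht.2.2 then (s.1, pyAddAt (pyAddAt s.2 lo 1) hi (-1))
    else (pyAddAt (pyAddAt s.1 lo 1) hi (-1), s.2)
  else s

-- B's _prefix(diff, q): running prefix sums of the first q difference entries (out.append = Array.push)
def prefixB (diff : Array Int) (q : Int) : List Int :=
  ((PySem.List.pyRange 0 q).foldl
    (fun (oc : Array Int × Int) i =>
      let cur := oc.2 + pyGetA diff i 0
      (oc.1.push cur, cur)) (#[], 0)).1.toList

def f_alt (people : List (Int × Int × String)) (q : Int) : Int × Int :=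
  let t := people.foldl (stepB q) (Array.replicate (q + 1).toNat 0, Array.replicate (q + 1).toNat 0)
  let h := prefixB t.1 q
  let v := prefixB t.2 q
  (pyArgmax h, pyArgmax v)

-- ===== PRECONDITION & SPEC =====
-- Pre_f is A's return domain minus one corner: q ≥ 1 (for q ≤ 0, max of an empty list raises
-- ValueError) and, per person: 'S'/'W' sweeps need their coordinate ≤ q (beyond, A raises
-- IndexError), and the 'N'/else sweeps need their start coordinate+1 ≥ 0. Besides the inputs
-- where A raises, this excludes people whose sweep starts at a negative index (coordinate in
-- [-q-1,-2]), where A's returned value comes from Python's negative-index wraparound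
-- double-counting right-end cells — B's clamped difference updates do not reproduce that.
def Pre_f (people : List (Int × Int × String)) (q : Int) : Prop :=
  1 ≤ q ∧ ∀ p ∈ people,
    if p.2.2 = "S" then p.2.1 ≤ q
    else if p.2.2 = "N" then -1 ≤ p.2.1
    else if p.2.2 = "W" then p.1 ≤ q
    else -1 ≤ p.1
instance (people : List (Int × Int × String)) (q : Int) : Decidable (Pre_f people q) := by
  unfold Pre_f; infer_instance

def pvWitness_f : (List (Int × Int × String)) × Int := ([(0, 1, "N"), (2, 0, "S"), (3, 3, "E")], 3)

def Spec_f (people : List (Int × Int × String)) (q : Int) (out : Int × Int) : Prop :=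
  out = f_alt people q
instance (people : List (Int × Int × String)) (q : Int) (out : Int × Int) : Decidable (Spec_f people q out) := by
  unfold Spec_f; infer_instance

-- A raises IndexError when some person's sweep runs past an end of the array (d='S' or 'W'
-- with coordinate > q, or d='N' or other with coordinate < -q-1); B's clamped updates return
-- the answer for the in-grid part of the range there.
def Raises_f (people : List (Int × Int × String)) (q : Int) : Prop :=
  1 ≤ q ∧ ∃ p ∈ people,
    (p.2.2 = "S" ∧ q < p.2.1) ∨
    (p.2.2 = "N" ∧ p.2.1 < -(q + 1)) ∨
    (p.2.2 = "W" ∧ q < p.1) ∨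
    (p.2.2 ≠ "S" ∧ p.2.2 ≠ "N" ∧ p.2.2 ≠ "W" ∧ p.1 < -(q + 1))
instance (people : List (Int × Int × String)) (q : Int) : Decidable (Raises_f people q) := by
  unfold Raises_f; infer_instance

def pvRaiseWitness_f : (List (Int × Int × String)) × Int := ([(0, 5, "S")], 2)
def pvRaiseWitnessOut_f : Int × Int := (0, 0)

-- ===== CLAIM (what is proved, stated in full; the proofs are below) =====
def Claim_equal_f : Prop := ∀ (people : List (Int × Int × String)) (q : Int), Dom_f people q → Pre_f people q → Spec_f people q (f people q)
def Claim_raises_f : Prop := (∀ (people : List (Int × Int × String)) (q : Int), Dom_f people q → Raises_f people q → ¬ Pre_f people q) ∧ (Dom_f (pvRaiseWitness_f.1) (pvRaiseWitness_f.2) ∧ Raises_f (pvRaiseWitness_f.1) (pvRaiseWitness_f.2) ∧ f_alt (pvRaiseWitness_f.1) (pvRaiseWitness_f.2) = pvRaiseWitnessOut_f)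

-- ===== LEMMAS AND PROOFS =====

-- list-level twins of the ports' loop bodies (proof layer: the invariant lives on lists)
def pyAddAtL (xs : List Int) (i δ : Int) : List Int :=
  PySem.List.pySetD xs i (PySem.List.pyGetD xs i 0 + δ)

def stepAL (q : Int) (s : List Int × List Int) (p : Int × Int × String) : List Int × List Int :=
  if p.2.2 == "S" then (s.1, (PySem.List.pyRange 0 p.2.1).foldl (fun acc i => pyAddAtL acc i 1) s.2)
  else if p.2.2 == "N" then (s.1, (PySem.List.pyRange (p.2.1 + 1) q).foldl (fun acc i => pyAddAtL acc i 1) s.2)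
  else if p.2.2 == "W" then ((PySem.List.pyRange 0 p.1).foldl (fun acc i => pyAddAtL acc i 1) s.1, s.2)
  else ((PySem.List.pyRange (p.1 + 1) q).foldl (fun acc i => pyAddAtL acc i 1) s.1, s.2)

def stepBL (q : Int) (s : List Int × List Int) (p : Int × Int × String) : List Int × List Int :=
  let lht : Int × Int × Bool :=
    if p.2.2 == "S" then (0, p.2.1, true)
    else if p.2.2 == "N" then (p.2.1 + 1, q, true)
    else if p.2.2 == "W" then (0, p.1, false)
    else (p.1 + 1, q, false)
  let lo := max lht.1 0
  let hi := min lht.2.1 q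
  if lo < hi then
    if lht.2.2 then (s.1, pyAddAtL (pyAddAtL s.2 lo 1) hi (-1))
    else (pyAddAtL (pyAddAtL s.1 lo 1) hi (-1), s.2)
  else s

def prefixBL (diff : List Int) (q : Int) : List Int :=
  ((PySem.List.pyRange 0 q).foldl
    (fun (oc : List Int × Int) i =>
      let cur := oc.2 + PySem.List.pyGetD diff i 0
      (oc.1 ++ [cur], cur)) ([], 0)).1

-- bridges: each Array helper computes its list twin through toList
lemma pyIdx?_lt {n : Nat} {i : Int} {k : Nat} (h : PySem.List.pyIdx? n i = some k) : k < n := by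
  unfold PySem.List.pyIdx? at h
  split_ifs at h <;> simp_all <;> omega

lemma getD_toList (a : Array Int) (k : Nat) (d : Int) : a.getD k d = a.toList.getD k d := by
  simp [Array.getD, List.getD_eq_getElem?_getD]
  split_ifs with h
  · simp [h]
  · rw [Array.getElem?_eq_none (by simpa using h)]; rfl

lemma toList_pyAddAt (xs : Array Int) (i δ : Int) :
    (pyAddAt xs i δ).toList = pyAddAtL xs.toList i δ := by
  unfold pyAddAt pyAddAtL PySem.List.pySetD PySem.List.pySet? PySem.List.pyGetD PySem.List.pyGet?
  have hlen : xs.toList.length = xs.size := by simp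
  rw [hlen]
  cases h : PySem.List.pyIdx? xs.size i with
  | none => simp
  | some k =>
    have hk : k < xs.size := pyIdx?_lt h
    have hk' : k < xs.toList.length := by simpa using hk
    simp only [Option.map_some, Option.bind_some, Option.getD_some,
      Array.toList_modify, List.getElem?_eq_getElem hk']
    rw [List.modify_eq_set_get _ hk']
    simp

lemma pyGetA_toList (xs : Array Int) (i d : Int) :
    pyGetA xs i d = PySem.List.pyGetD xs.toList i d := by
  unfold pyGetA PySem.List.pyGetD PySem.List.pyGet?
  have hlen : xs.toList.length = xs.size := by simp
  rw [hlen]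
  cases h : PySem.List.pyIdx? xs.size i with
  | none => simp
  | some k =>
    have hk : k < xs.size := pyIdx?_lt h
    have hk' : k < xs.toList.length := by simpa using hk
    simp only [Option.bind_some, getD_toList, List.getD_eq_getElem?_getD,
      List.getElem?_eq_getElem hk']

lemma toList_sweep (l : List Int) (xs : Array Int) :
    (l.foldl (fun acc i => pyAddAt acc i 1) xs).toList
      = l.foldl (fun acc i => pyAddAtL acc i 1) xs.toList := by
  induction l generalizing xs with
  | nil => rfl
  | cons a t ih => simp only [List.foldl_cons, ih, toList_pyAddAt]

lemma stepA_toList (q : Int) (s : Array Int × Array Int) (p : Int × Int × String) :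
    ((stepA q s p).1.toList, (stepA q s p).2.toList)
      = stepAL q (s.1.toList, s.2.toList) p := by
  unfold stepA stepAL
  split_ifs <;> simp [toList_sweep]

lemma stepB_toList (q : Int) (s : Array Int × Array Int) (p : Int × Int × String) :
    ((stepB q s p).1.toList, (stepB q s p).2.toList)
      = stepBL q (s.1.toList, s.2.toList) p := by
  unfold stepB stepBL
  split_ifs <;> simp <;> split_ifs <;> simp [toList_pyAddAt]

lemma fold_stepA_toList (q : Int) (people : List (Int × Int × String)) (s : Array Int × Array Int) :
    ((people.foldl (stepA q) s).1.toList, (people.foldl (stepA q) s).2.toList)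
      = people.foldl (stepAL q) (s.1.toList, s.2.toList) := by
  induction people generalizing s with
  | nil => rfl
  | cons p ps ih => simp only [List.foldl_cons, ih, stepA_toList]

lemma fold_stepB_toList (q : Int) (people : List (Int × Int × String)) (s : Array Int × Array Int) :
    ((people.foldl (stepB q) s).1.toList, (people.foldl (stepB q) s).2.toList)
      = people.foldl (stepBL q) (s.1.toList, s.2.toList) := by
  induction people generalizing s with
  | nil => rfl
  | cons p ps ih => simp only [List.foldl_cons, ih, stepB_toList]

lemma prefixB_toList (d : Array Int) (q : Int) : prefixB d q = prefixBL d.toList q := by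
  unfold prefixB prefixBL
  suffices h : ∀ (l : List Int) (oc : Array Int × Int),
      ((l.foldl (fun (oc : Array Int × Int) i =>
          (oc.1.push (oc.2 + pyGetA d i 0), oc.2 + pyGetA d i 0)) oc).1.toList,
        (l.foldl (fun (oc : Array Int × Int) i =>
          (oc.1.push (oc.2 + pyGetA d i 0), oc.2 + pyGetA d i 0)) oc).2)
      = l.foldl (fun (oc : List Int × Int) i =>
          (oc.1 ++ [oc.2 + PySem.List.pyGetD d.toList i 0], oc.2 + PySem.List.pyGetD d.toList i 0))
          (oc.1.toList, oc.2) by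
    have := h (PySem.List.pyRange 0 q) (#[], 0)
    rw [← this]
  intro l
  induction l with
  | nil => intro oc; rfl
  | cons a t ih =>
    intro oc
    simp only [pyGetA_toList] at ih ⊢
    simp only [List.foldl_cons]
    rw [ih]
    simp [Array.toList_push]

-- reference value: the list of prefix sums of the first n entries of d
def pref (d : List Int) (n : Nat) : List Int := (List.range n).map (fun i => (d.take (i + 1)).sum)

lemma pref_length (d : List Int) (n : Nat) : (pref d n).length = n := by simp [pref]

lemma pref_getD (d : List Int) (n i : Nat) (hi : i < n) :
    (pref d n).getD i 0 = (d.take (i + 1)).sum := by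
  simp [pref, List.getD_eq_getElem?_getD, List.getElem?_map, List.getElem?_range hi]

lemma sum_take_succ (d : List Int) (i : Nat) :
    (d.take (i + 1)).sum = (d.take i).sum + d.getD i 0 := by
  rw [List.take_add_one, List.sum_append, List.getD_eq_getElem?_getD]
  cases d[i]? <;> simp

lemma list_ext_getD (xs ys : List Int) (hl : xs.length = ys.length)
    (h : ∀ i, i < xs.length → xs.getD i 0 = ys.getD i 0) : xs = ys := by
  apply List.ext_getElem hl
  intro i h1 h2
  have := h i h1
  rwa [List.getD_eq_getElem?_getD, List.getD_eq_getElem?_getD,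
    List.getElem?_eq_getElem h1, List.getElem?_eq_getElem h2] at this

lemma length_pyAddAtL (xs : List Int) (i δ : Int) : (pyAddAtL xs i δ).length = xs.length := by
  simp [pyAddAtL, PySem.List.length_pySetD]

lemma pyAddAtL_of_nonneg (xs : List Int) (i δ : Int) (h0 : 0 ≤ i) :
    pyAddAtL xs i δ = xs.set i.toNat (xs.getD i.toNat 0 + δ) := by
  have hi : i = ((i.toNat : Nat) : Int) := (Int.toNat_of_nonneg h0).symm
  rw [pyAddAtL, hi, PySem.List.pyGetD_natCast, PySem.List.pySetD_natCast]
  simp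
  rw [max_eq_left h0]

lemma getD_pyAddAtL (xs : List Int) (i δ : Int) (h0 : 0 ≤ i) (j : Nat) (hj : j < xs.length) :
    (pyAddAtL xs i δ).getD j 0 = xs.getD j 0 + (if (j : Int) = i then δ else 0) := by
  rw [pyAddAtL_of_nonneg xs i δ h0, List.getD_eq_getElem?_getD, List.getElem?_set]
  by_cases hij : i.toNat = j
  · have hji : (j : Int) = i := by omega
    rw [if_pos hij, if_pos (hij ▸ hj), if_pos hji, hij]
    simp [List.getD_eq_getElem?_getD]
  · have hji : ¬ ((j : Int) = i) := by omega
    rw [if_neg hij, if_neg hji, List.getD_eq_getElem?_getD]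
    simp

lemma sum_take_set_nat (d : List Int) (j m : Nat) (v : Int) :
    ((d.set j v).take m).sum = (d.take m).sum + (if j < m ∧ j < d.length then v - d.getD j 0 else 0) := by
  induction d generalizing j m with
  | nil => simp
  | cons x t ih =>
    cases j with
    | zero =>
      cases m with
      | zero => simp
      | succ m => simp [List.set_cons_zero, List.take_succ_cons]; ring
    | succ j =>
      cases m with
      | zero => simp
      | succ m =>
        simp only [List.set_cons_succ, List.take_succ_cons, List.sum_cons, ih j m,
          List.length_cons, List.getD_cons_succ]
        have : (j + 1 < m + 1 ∧ j + 1 < t.length + 1) ↔ (j < m ∧ j < t.length) := by omega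
        rw [if_congr this rfl rfl]; ring

lemma sum_take_pyAddAtL (d : List Int) (i δ : Int) (m : Nat) (h0 : 0 ≤ i) :
    ((pyAddAtL d i δ).take m).sum
      = (d.take m).sum + (if i < (m : Int) ∧ i.toNat < d.length then δ else 0) := by
  rw [pyAddAtL_of_nonneg d i δ h0, sum_take_set_nat]
  have : (i.toNat < m ∧ i.toNat < d.length) ↔ (i < (m : Int) ∧ i.toNat < d.length) := by omega
  rw [if_congr this rfl rfl]
  split_ifs with h
  · have hlt : i.toNat < d.length := h.2
    rw [List.getD_eq_getElem?_getD, List.getElem?_eq_getElem hlt]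
    simp
  · rfl

-- A's inner sweep: length is preserved and cell j gains 1 exactly for a ≤ j < b
lemma foldl_inc_spec (xs : List Int) (a b : Int) (h0 : 0 ≤ a) :
    ((PySem.List.pyRange a b).foldl (fun acc i => pyAddAtL acc i 1) xs).length = xs.length ∧
    ∀ j : Nat, j < xs.length →
      ((PySem.List.pyRange a b).foldl (fun acc i => pyAddAtL acc i 1) xs).getD j 0
        = xs.getD j 0 + (if a ≤ (j : Int) ∧ (j : Int) < b then 1 else 0) := by
  by_cases hab : b ≤ a
  · rw [PySem.List.pyRange_one_eq_nil hab]
    refine ⟨rfl, fun j hj => ?_⟩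
    have : ¬ (a ≤ (j : Int) ∧ (j : Int) < b) := by omega
    simp [this]
  · rw [PySem.List.pyRange_one_cons (by omega)]
    simp only [List.foldl_cons]
    have hlen : (pyAddAtL xs a 1).length = xs.length := length_pyAddAtL xs a 1
    obtain ⟨ih_len, ih_get⟩ := foldl_inc_spec (pyAddAtL xs a 1) (a + 1) b (by omega)
    refine ⟨by rw [ih_len, hlen], fun j hj => ?_⟩
    rw [ih_get j (by omega), getD_pyAddAtL xs a 1 h0 j hj]
    split_ifs <;> omega
termination_by (b - a).toNat
decreasing_by omega

-- B's prefix loop computes exactly pref, carrying the running sum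
lemma prefixBL_fold (d : List Int) (n : Nat) :
    (PySem.List.pyRange 0 (n : Int)).foldl
      (fun (oc : List Int × Int) i =>
        let cur := oc.2 + PySem.List.pyGetD d i 0
        (oc.1 ++ [cur], cur)) ([], 0)
    = (pref d n, (d.take n).sum) := by
  induction n with
  | zero => rw [PySem.List.pyRange_one_eq_nil (by omega)]; simp [pref]
  | succ n ih =>
    have hc : ((n + 1 : Nat) : Int) = (n : Int) + 1 := by push_cast; ring
    rw [hc, PySem.List.pyRange_one_succ_right (by positivity), List.foldl_append, ih]
    simp only [List.foldl_cons, List.foldl_nil, PySem.List.pyGetD_natCast]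
    rw [← sum_take_succ]
    refine Prod.ext ?_ rfl
    simp only [pref, List.range_succ, List.map_append, List.map_cons, List.map_nil]

lemma prefixBL_eq_pref (d : List Int) (n : Nat) : prefixBL d (n : Int) = pref d n := by
  rw [prefixBL, prefixBL_fold]

-- per-person condition under which A's sweep stays in range and B's clamp is exact
def GoodP (q : Int) (p : Int × Int × String) : Prop :=
  if p.2.2 == "S" then p.2.1 ≤ q
  else if p.2.2 == "N" then -1 ≤ p.2.1
  else if p.2.2 == "W" then p.1 ≤ q
  else -1 ≤ p.1

-- the invariant tying A's count arrays to the prefix sums of B's difference arrays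
def InvAB (qn : Nat) (s t : List Int × List Int) : Prop :=
  t.1.length = qn + 1 ∧ t.2.length = qn + 1 ∧ s.1 = pref t.1 qn ∧ s.2 = pref t.2 qn

-- one person: A's range sweep and B's clamped diff update preserve the invariant
lemma step_pres (qn : Nat) (hqn : 1 ≤ qn) (p : Int × Int × String)
    (hg : GoodP (qn : Int) p)
    (s t : List Int × List Int) (hR : InvAB qn s t) :
    InvAB qn (stepAL (qn : Int) s p) (stepBL (qn : Int) t p) := by
  obtain ⟨hl1, hl2, he1, he2⟩ := hR
  -- generic: A sweeps [lo, hi) on xs = pref d qn; nd is B's new diff array with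
  -- sum(take (j+1) nd) = sum(take (j+1) d) + [lo ≤ j < hi] for all j < qn
  have gen : ∀ (xs d nd : List Int) (lo hi : Int), 0 ≤ lo →
      xs = pref d qn →
      (∀ j : Nat, j < qn →
        ((nd.take (j + 1)).sum
          = (d.take (j + 1)).sum + (if lo ≤ (j : Int) ∧ (j : Int) < hi then 1 else 0))) →
      (PySem.List.pyRange lo hi).foldl (fun acc i => pyAddAtL acc i 1) xs = pref nd qn := by
    intro xs d nd lo hi hlo hxs hsum
    obtain ⟨hlen, hget⟩ := foldl_inc_spec xs lo hi hlo
    apply list_ext_getD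
    · rw [hlen, hxs, pref_length, pref_length]
    · intro j hj
      rw [hlen, hxs, pref_length] at hj
      rw [hget j (by rw [hxs, pref_length]; exact hj), hxs, pref_getD _ _ _ hj,
        pref_getD _ _ _ hj, hsum j hj]
  -- generic: the effect of B's clamped pair update on prefix sums of d (lengths qn+1)
  have upd : ∀ (d : List Int) (lo hi : Int), d.length = qn + 1 → 0 ≤ lo → lo < hi → hi ≤ (qn : Int) + 1 →
      ∀ j : Nat, j < qn →
        (((pyAddAtL (pyAddAtL d lo 1) hi (-1)).take (j + 1)).sum
          = (d.take (j + 1)).sum + (if lo ≤ (j : Int) ∧ (j : Int) < hi then 1 else 0)) := by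
    intro d lo hi hdl hlo hlohi hhi j hj
    rw [sum_take_pyAddAtL _ _ _ _ (by omega), sum_take_pyAddAtL _ _ _ _ hlo]
    have hLen : (pyAddAtL d lo 1).length = d.length := length_pyAddAtL d lo 1
    by_cases hloj : lo ≤ (j : Int)
    · rw [if_pos ⟨by omega, by omega⟩]
      by_cases hhij : hi ≤ (j : Int)
      · rw [if_pos ⟨by omega, by omega⟩, if_neg (by omega)]; ring
      · rw [if_neg (by omega), if_pos ⟨hloj, by omega⟩]; ring
    · rw [if_neg (by omega), if_neg (by omega), if_neg (by omega)]; ring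
  unfold GoodP at hg
  rcases hfs : (p.2.2 == "S") with _ | _
  case true =>
    -- S: A sweeps vert over [0, y); B clamps to [0, min y q)
    rw [hfs] at hg
    simp at hg
    have hA : stepAL (qn : Int) s p
        = (s.1, (PySem.List.pyRange 0 p.2.1).foldl (fun acc i => pyAddAtL acc i 1) s.2) := by
      simp [stepAL, hfs]
    by_cases hpos : 0 < p.2.1
    · have hq0 : (0 : Int) < (qn : Int) := by omega
      have hmin : min p.2.1 (qn : Int) = p.2.1 := min_eq_left hg
      have hB : stepBL (qn : Int) t p = (t.1, pyAddAtL (pyAddAtL t.2 0 1) p.2.1 (-1)) := by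
        simp [stepBL, hfs, hmin, hpos]
      unfold InvAB
      rw [hA, hB]
      refine ⟨hl1, by simp [length_pyAddAtL, hl2], he1, ?_⟩
      exact gen s.2 t.2 _ 0 p.2.1 le_rfl he2
        (upd t.2 0 p.2.1 hl2 le_rfl hpos (by omega))
    · have hB : stepBL (qn : Int) t p = t := by
        simp [stepBL, hfs, hpos]
      unfold InvAB
      rw [hA, hB]
      refine ⟨hl1, hl2, he1, ?_⟩
      refine gen s.2 t.2 t.2 0 p.2.1 le_rfl he2 (fun j hj => ?_)
      rw [if_neg (by omega)]; ring
  case false =>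
  rcases hfn : (p.2.2 == "N") with _ | _
  case true =>
    -- N: A sweeps vert over [y+1, q); B clamps to [y+1, q)
    rw [hfs, hfn] at hg
    simp at hg
    have hA : stepAL (qn : Int) s p
        = (s.1, (PySem.List.pyRange (p.2.1 + 1) (qn : Int)).foldl (fun acc i => pyAddAtL acc i 1) s.2) := by
      simp [stepAL, hfs, hfn]
    have hmax : max (p.2.1 + 1) 0 = p.2.1 + 1 := max_eq_left (by omega)
    by_cases hne : p.2.1 + 1 < (qn : Int)
    · have hB : stepBL (qn : Int) t p = (t.1, pyAddAtL (pyAddAtL t.2 (p.2.1 + 1) 1) (qn : Int) (-1)) := by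
        simp [stepBL, hfs, hfn, hmax, hne]
      unfold InvAB
      rw [hA, hB]
      refine ⟨hl1, by simp [length_pyAddAtL, hl2], he1, ?_⟩
      refine gen s.2 t.2 _ (p.2.1 + 1) (qn : Int) (by omega) he2 (fun j hj => ?_)
      rw [upd t.2 (p.2.1 + 1) (qn : Int) hl2 (by omega) hne (by omega) j hj]
    · have hB : stepBL (qn : Int) t p = t := by
        simp [stepBL, hfs, hfn, hne]
      unfold InvAB
      rw [hA, hB]
      refine ⟨hl1, hl2, he1, ?_⟩
      refine gen s.2 t.2 t.2 (p.2.1 + 1) (qn : Int) (by omega) he2 (fun j hj => ?_)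
      rw [if_neg (by omega)]; ring
  case false =>
  rcases hfw : (p.2.2 == "W") with _ | _
  case true =>
    -- W: A sweeps horiz over [0, x); B clamps to [0, min x q)
    rw [hfs, hfn, hfw] at hg
    simp at hg
    have hA : stepAL (qn : Int) s p
        = ((PySem.List.pyRange 0 p.1).foldl (fun acc i => pyAddAtL acc i 1) s.1, s.2) := by
      simp [stepAL, hfs, hfn, hfw]
    by_cases hpos : 0 < p.1
    · have hq0 : (0 : Int) < (qn : Int) := by omega
      have hmin : min p.1 (qn : Int) = p.1 := min_eq_left hg
      have hB : stepBL (qn : Int) t p = (pyAddAtL (pyAddAtL t.1 0 1) p.1 (-1), t.2) := by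
        simp [stepBL, hfs, hfn, hfw, hmin, hpos]
      unfold InvAB
      rw [hA, hB]
      refine ⟨by simp [length_pyAddAtL, hl1], hl2, ?_, he2⟩
      exact gen s.1 t.1 _ 0 p.1 le_rfl he1
        (upd t.1 0 p.1 hl1 le_rfl hpos (by omega))
    · have hB : stepBL (qn : Int) t p = t := by
        simp [stepBL, hfs, hfn, hfw, hpos]
      unfold InvAB
      rw [hA, hB]
      refine ⟨hl1, hl2, ?_, he2⟩
      refine gen s.1 t.1 t.1 0 p.1 le_rfl he1 (fun j hj => ?_)
      rw [if_neg (by omega)]; ring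
  case false =>
    -- E / other: A sweeps horiz over [x+1, q); B clamps to [x+1, q)
    rw [hfs, hfn, hfw] at hg
    simp at hg
    have hA : stepAL (qn : Int) s p
        = ((PySem.List.pyRange (p.1 + 1) (qn : Int)).foldl (fun acc i => pyAddAtL acc i 1) s.1, s.2) := by
      simp [stepAL, hfs, hfn, hfw]
    have hmax : max (p.1 + 1) 0 = p.1 + 1 := max_eq_left (by omega)
    by_cases hne : p.1 + 1 < (qn : Int)
    · have hB : stepBL (qn : Int) t p = (pyAddAtL (pyAddAtL t.1 (p.1 + 1) 1) (qn : Int) (-1), t.2) := by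
        simp [stepBL, hfs, hfn, hfw, hmax, hne]
      unfold InvAB
      rw [hA, hB]
      refine ⟨by simp [length_pyAddAtL, hl1], hl2, ?_, he2⟩
      refine gen s.1 t.1 _ (p.1 + 1) (qn : Int) (by omega) he1 (fun j hj => ?_)
      rw [upd t.1 (p.1 + 1) (qn : Int) hl1 (by omega) hne (by omega) j hj]
    · have hB : stepBL (qn : Int) t p = t := by
        simp [stepBL, hfs, hfn, hfw, hne]
      unfold InvAB
      rw [hA, hB]
      refine ⟨hl1, hl2, ?_, he2⟩
      refine gen s.1 t.1 t.1 (p.1 + 1) (qn : Int) (by omega) he1 (fun j hj => ?_)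
      rw [if_neg (by omega)]; ring

lemma fold_pres (qn : Nat) (hqn : 1 ≤ qn) (people : List (Int × Int × String))
    (hb : ∀ p ∈ people, GoodP (qn : Int) p)
    (s t : List Int × List Int) (hR : InvAB qn s t) :
    InvAB qn (people.foldl (stepAL (qn : Int)) s) (people.foldl (stepBL (qn : Int)) t) := by
  induction people generalizing s t with
  | nil => simpa
  | cons p ps ih =>
    simp only [List.foldl_cons]
    exact ih (fun p hp => hb p (List.mem_cons_of_mem _ hp)) _ _
      (step_pres qn hqn p (hb p (List.mem_cons_self)) s t hR)

lemma InvAB_init (qn : Nat) :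
    InvAB qn (List.replicate qn 0, List.replicate qn 0)
      (List.replicate (qn + 1) 0, List.replicate (qn + 1) 0) := by
  have h : List.replicate qn (0 : Int) = pref (List.replicate (qn + 1) 0) qn := by
    apply list_ext_getD
    · simp [pref_length]
    · intro i hi
      simp only [List.length_replicate] at hi
      rw [pref_getD _ _ _ hi, List.take_replicate]
      simp [List.getD_eq_getElem?_getD, hi]
  exact ⟨by simp, by simp, h, h⟩

-- ===== VERDICT (by name: the statement is the Claim_ definition above) =====
theorem f_spec : Claim_equal_f := by
  intro people q hdom hpre
  obtain ⟨hq1, hb⟩ := hpre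
  unfold Spec_f f f_alt
  set qn := q.toNat with hqn
  have hq : q = (qn : Int) := by omega
  have h2 : ((qn : Int) + 1).toNat = qn + 1 := by omega
  rw [hq, h2]
  have hA := fold_stepA_toList (qn : Int) people
    (Array.replicate ((qn : Int)).toNat 0, Array.replicate ((qn : Int)).toNat 0)
  have hB := fold_stepB_toList (qn : Int) people
    (Array.replicate (qn + 1) 0, Array.replicate (qn + 1) 0)
  simp only [Array.toList_replicate, Int.toNat_natCast] at hA hB
  have hg : ∀ p ∈ people, GoodP (qn : Int) p := by
    intro p hp
    have hpre' := hb p hp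
    unfold GoodP
    by_cases hS : p.2.2 = "S"
    · simp [hS]
      rw [if_pos hS] at hpre'
      exact hq ▸ hpre'
    · by_cases hN : p.2.2 = "N"
      · simp [hN]
        rw [if_neg hS, if_pos hN] at hpre'
        exact hpre'
      · by_cases hW : p.2.2 = "W"
        · simp [hW]
          rw [if_neg hS, if_neg hN, if_pos hW] at hpre'
          exact hq ▸ hpre'
        · simp [hS, hN, hW]
          rw [if_neg hS, if_neg hN, if_neg hW] at hpre'
          exact hpre'
  obtain ⟨-, -, he1, he2⟩ := fold_pres qn (by omega) people hg _ _ (InvAB_init qn)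
  simp only [prefixB_toList, prefixBL_eq_pref]
  rw [show (List.foldl (stepA (qn : Int))
      (Array.replicate qn 0, Array.replicate qn 0) people).1.toList
      = (List.foldl (stepAL (qn : Int)) (List.replicate qn 0, List.replicate qn 0) people).1 from
      congrArg Prod.fst hA,
    show (List.foldl (stepA (qn : Int))
      (Array.replicate qn 0, Array.replicate qn 0) people).2.toList
      = (List.foldl (stepAL (qn : Int)) (List.replicate qn 0, List.replicate qn 0) people).2 from
      congrArg Prod.snd hA,
    show (List.foldl (stepB (qn : Int))
      (Array.replicate (qn + 1) 0, Array.replicate (qn + 1) 0) people).1.toList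
      = (List.foldl (stepBL (qn : Int)) (List.replicate (qn + 1) 0, List.replicate (qn + 1) 0) people).1 from
      congrArg Prod.fst hB,
    show (List.foldl (stepB (qn : Int))
      (Array.replicate (qn + 1) 0, Array.replicate (qn + 1) 0) people).2.toList
      = (List.foldl (stepBL (qn : Int)) (List.replicate (qn + 1) 0, List.replicate (qn + 1) 0) people).2 from
      congrArg Prod.snd hB,
    he1, he2]

@[simp] theorem f_raises : Claim_raises_f := by
  unfold Claim_raises_f
  refine ⟨?_, by decide⟩
  rintro people q hdom ⟨hq, p, hp, hbad⟩ ⟨hq1, hpre⟩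
  have hpre' := hpre p hp
  rcases hbad with ⟨hS, hy⟩ | ⟨hN, hy⟩ | ⟨hW, hx⟩ | ⟨hS', hN', hW', hx⟩
  · rw [if_pos hS] at hpre'; omega
  · have : ¬ (p.2.2 = "S") := by rw [hN]; decide
    rw [if_neg this, if_pos hN] at hpre'; omega
  · have h1 : ¬ (p.2.2 = "S") := by rw [hW]; decide
    have h2 : ¬ (p.2.2 = "N") := by rw [hW]; decide
    rw [if_neg h1, if_neg h2, if_pos hW] at hpre'; omega
  · rw [if_neg hS', if_neg hN', if_neg hW'] at hpre'; omega
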